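-- pv_equiv track=rewrite | github.com/pypi-data/pypi-mirror-74 | packages/xlist/xlist-0.0.8.tar.gz/xlist-0.0.8/xlist/index.py | index_lst_not
-- ===== SOURCE A (Python) =====
-- def index_lst_not(ol,value):
--     length = ol.__len__()
--     for i in range(length-1,-1,-1):
--         if(value == ol[i]):
--             pass
--         else:
--             return(i)
--     return(None)
-- ===== SOURCE B (Python) =====
-- def index_lst_not(ol, value):
--     result = None
--     i = 0
--     for x in ol:
--         if x != value:
--             result = i
--         i += 1
--     return result
-- ===== Notes on version B (the rewrite author's own statement) =====
-- stated objective: alternative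
-- what changed: Replaces the reverse index scan with early return by a single forward element pass that accumulates the last differing index in a result variable.
import Mathlib
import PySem

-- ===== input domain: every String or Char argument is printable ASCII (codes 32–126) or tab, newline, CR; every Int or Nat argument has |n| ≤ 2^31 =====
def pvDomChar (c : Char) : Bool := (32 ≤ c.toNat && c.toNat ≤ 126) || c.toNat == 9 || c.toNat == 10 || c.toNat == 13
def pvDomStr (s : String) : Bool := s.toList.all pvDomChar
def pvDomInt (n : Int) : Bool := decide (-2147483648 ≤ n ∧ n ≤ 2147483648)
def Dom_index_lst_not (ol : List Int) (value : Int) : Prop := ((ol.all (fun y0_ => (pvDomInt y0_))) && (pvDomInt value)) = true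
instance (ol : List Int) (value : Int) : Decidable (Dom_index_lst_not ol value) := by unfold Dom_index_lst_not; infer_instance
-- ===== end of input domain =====

-- B replaces A's back-to-front indexed scan (early return) by a forward element pass
-- accumulating the last differing index; same cost, different decomposition.

-- ===== PORT A =====
-- the for-loop over range(length-1,-1,-1) with early return; ol[i] is always in
-- range here so pyGet?'s none branch (Python's IndexError) is unreachable
def pvALoop (ol : List Int) (value : Int) : List Int → Option Int
  | [] => none
  | i :: rest =>
    match PySem.List.pyGet? ol i with
    | some x => if value == x then pvALoop ol value rest else some i
    | none => none

def index_lst_not (ol : List Int) (value : Int) : Option Int :=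
  pvALoop ol value (PySem.List.pyRange ((ol.length : Int) - 1) (-1) (-1))

-- ===== PORT B =====
-- state = (running index i, result so far)
def index_lst_not_alt (ol : List Int) (value : Int) : Option Int :=
  (ol.foldl (fun (st : Int × Option Int) x =>
      (st.1 + 1, if x != value then some st.1 else st.2)) (0, none)).2

-- ===== PRECONDITION & SPEC =====
def Spec_index_lst_not (ol : List Int) (value : Int) (out : Option Int) : Prop := out = index_lst_not_alt ol value
instance (ol : List Int) (value : Int) (out : Option Int) : Decidable (Spec_index_lst_not ol value out) := by unfold Spec_index_lst_not; infer_instance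

-- ===== CLAIM (what is proved, stated in full; the proofs are below) =====
def Claim_equal_index_lst_not : Prop := ∀ (ol : List Int) (value : Int), Dom_index_lst_not ol value → Spec_index_lst_not ol value (index_lst_not ol value)

-- ===== LEMMAS AND PROOFS =====

-- A's loop only looks inside ol, so appending an element is invisible to it
theorem pvALoop_append (ol : List Int) (x value : Int) (idxs : List Int)
    (h : ∀ i ∈ idxs, 0 ≤ i ∧ i < (ol.length : Int)) :
    pvALoop (ol ++ [x]) value idxs = pvALoop ol value idxs := by
  induction idxs with
  | nil => rfl
  | cons i rest ih =>
    have hi := h i (by simp)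
    have hget : PySem.List.pyGet? (ol ++ [x]) i = PySem.List.pyGet? ol i := by
      have h1 : i.toNat < ol.length := by omega
      rw [PySem.List.pyGet?_of_nonneg (h := hi.1), PySem.List.pyGet?_of_nonneg (h := hi.1)]
      simp [List.getElem?_append_left h1]
    simp only [pvALoop, hget]
    cases PySem.List.pyGet? ol i with
    | none => rfl
    | some y =>
      by_cases hv : value == y
      · simp [hv, ih (fun j hj => h j (by simp [hj]))]
      · simp [hv]

-- A's recurrence on snoc
theorem portA_snoc (ol : List Int) (x value : Int) :
    index_lst_not (ol ++ [x]) value =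
      if x != value then some (ol.length : Int) else index_lst_not ol value := by
  unfold index_lst_not
  have hlen : ((ol ++ [x]).length : Int) - 1 = (ol.length : Int) := by simp
  rw [hlen, PySem.List.pyRange_neg_one_cons (by omega : (-1 : Int) < (ol.length : Int))]
  have hget : PySem.List.pyGet? (ol ++ [x]) (ol.length : Int) = some x := by
    rw [PySem.List.pyGet?_of_nonneg (h := by omega)]
    simp
  simp only [pvALoop, hget]
  have hmem : ∀ i ∈ PySem.List.pyRange ((ol.length : Int) - 1) (-1) (-1),
      0 ≤ i ∧ i < (ol.length : Int) := by
    intro i hi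
    rw [PySem.List.mem_pyRange_neg_one] at hi
    omega
  by_cases hv : x = value
  · rw [pvALoop_append ol x value _ hmem]
    simp [hv]
  · simp [bne, Ne.symm hv, hv]

-- the first component of B's fold counts the elements
theorem foldB_fst (ol : List Int) (value : Int) (st : Int × Option Int) :
    (ol.foldl (fun (st : Int × Option Int) x =>
      (st.1 + 1, if x != value then some st.1 else st.2)) st).1 = st.1 + ol.length := by
  induction ol generalizing st with
  | nil => simp
  | cons y ys ih =>
    rw [List.foldl_cons, ih]
    simp; omega

-- B's recurrence on snoc
theorem portB_snoc (ol : List Int) (x value : Int) :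
    index_lst_not_alt (ol ++ [x]) value =
      if x != value then some (ol.length : Int) else index_lst_not_alt ol value := by
  unfold index_lst_not_alt
  rw [List.foldl_append]
  simp only [List.foldl_cons, List.foldl_nil]
  rw [foldB_fst]
  by_cases hv : x != value <;> simp [hv]

-- ===== VERDICT (by name: the statement is the Claim_ definition above) =====
theorem index_lst_not_spec : Claim_equal_index_lst_not := by
  unfold Claim_equal_index_lst_not
  intro ol value hdom
  unfold Spec_index_lst_not
  clear hdom
  induction ol using List.reverseRecOn with
  | nil => rfl
  | append_singleton ys x ih =>
    rw [portA_snoc, portB_snoc, ih]
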